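-- pv_equiv track=rewrite | github.com/devoogd/challenges | 52/devoogd/pomodoro.py | create_pomodoro_sequence
-- ===== SOURCE A (Python) =====
-- def create_pomodoro_sequence(duration, short_rest, long_rest):
--     sequence = []
--     j = 0
--     focus_periods = duration//20
--     for i in range(focus_periods):
--         if i > 0 and j < 3:
--             sequence.append(5)
--             j = j +1
--         elif i > 0 and j == 3:
--             sequence.append(10)
--             j = 0
--         sequence.append(20)
--     return sequence
-- ===== SOURCE B (Python) =====
-- def create_pomodoro_sequence(duration, short_rest, long_rest):
--     focus_periods = duration // 20
--     if focus_periods <= 0: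
--         return []
--     # The sequence is periodic with period 8 items (4 focus periods):
--     # tile the full cycle and cut it to the exact length 2*n - 1.
--     length = 2 * focus_periods - 1
--     block = [20, 5, 20, 5, 20, 5, 20, 10]
--     return (block * ((length + 7) // 8))[:length]
-- ===== Notes on version B (the rewrite author's own statement) =====
-- stated objective: alternative
-- what changed: Instead of A's per-iteration loop with a mutable 3-then-reset rest counter, B observes the output is periodic with an 8-item cycle [20,5,20,5,20,5,20,10], tiles that block ceil((2n-1)/8) times and truncates to length 2n-1; no loop over focus periods at all.
import Mathlib
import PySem

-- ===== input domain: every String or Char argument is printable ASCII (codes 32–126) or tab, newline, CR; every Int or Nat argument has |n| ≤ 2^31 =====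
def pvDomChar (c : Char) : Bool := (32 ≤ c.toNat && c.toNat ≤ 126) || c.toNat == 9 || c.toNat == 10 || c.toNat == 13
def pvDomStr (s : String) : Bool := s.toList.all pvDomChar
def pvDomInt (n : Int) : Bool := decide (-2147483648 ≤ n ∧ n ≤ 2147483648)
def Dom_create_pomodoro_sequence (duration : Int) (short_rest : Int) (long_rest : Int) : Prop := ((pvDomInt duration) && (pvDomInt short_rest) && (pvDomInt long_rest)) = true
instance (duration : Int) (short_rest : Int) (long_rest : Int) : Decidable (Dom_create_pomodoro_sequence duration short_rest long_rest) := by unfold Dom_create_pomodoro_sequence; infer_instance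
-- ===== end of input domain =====

-- B replaces A's counter loop by tiling the 8-item cycle [20,5,20,5,20,5,20,10] and truncating
-- to length 2n-1 (n = duration//20); objective: alternative. Proved equal on the whole domain.


-- ===== PORT A =====
-- one loop iteration of A: state is (sequence, j)
def pomA_step (st : List Int × Int) (i : Int) : List Int × Int :=
  let st' :=
    if i > 0 && st.2 < 3 then (st.1 ++ [(5 : Int)], st.2 + 1)
    else if i > 0 && st.2 == 3 then (st.1 ++ [(10 : Int)], (0 : Int))
    else st
  (st'.1 ++ [(20 : Int)], st'.2)

def create_pomodoro_sequence (duration : Int) (short_rest : Int) (long_rest : Int) : List Int :=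
  let focus_periods := PySem.Int.floordiv duration 20
  ((PySem.List.pyRange 0 focus_periods 1).foldl pomA_step ([], 0)).1

-- ===== PORT B =====
def pomBlock : List Int := [20, 5, 20, 5, 20, 5, 20, 10]

def create_pomodoro_sequence_alt (duration : Int) (short_rest : Int) (long_rest : Int) : List Int :=
  let focus_periods := PySem.Int.floordiv duration 20
  if focus_periods ≤ 0 then []
  else
    let length := 2 * focus_periods - 1
    -- 'block * k' is List.replicate k block flattened; '[:length]' with length ≥ 1 is List.take (exact here)
    (List.flatten (List.replicate (PySem.Int.floordiv (length + 7) 8).toNat pomBlock)).take length.toNat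

-- ===== PRECONDITION & SPEC =====
def Spec_create_pomodoro_sequence (duration : Int) (short_rest : Int) (long_rest : Int) (out : List Int) : Prop := out = create_pomodoro_sequence_alt duration short_rest long_rest
instance (duration : Int) (short_rest : Int) (long_rest : Int) (out : List Int) : Decidable (Spec_create_pomodoro_sequence duration short_rest long_rest out) := by unfold Spec_create_pomodoro_sequence; infer_instance

-- ===== CLAIM (what is proved, stated in full; the proofs are below) =====
def Claim_equal_create_pomodoro_sequence : Prop := ∀ (duration : Int) (short_rest : Int) (long_rest : Int), Dom_create_pomodoro_sequence duration short_rest long_rest → Spec_create_pomodoro_sequence duration short_rest long_rest (create_pomodoro_sequence duration short_rest long_rest)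

-- ===== LEMMAS AND PROOFS =====
-- reference sequence: pomSpec n is the pomodoro list for n focus periods, built left to right
def pomSpec : Nat → List Int
  | 0 => []
  | Nat.succ m => pomSpec m ++ (if m = 0 then [20] else [if m % 4 = 0 then 10 else 5, 20])

-- appending one rest+focus pair, Int-indexed (shape of A's loop body after the first iteration)
def pomRest_step (out : List Int) (i : Int) : List Int :=
  out ++ [if PySem.Int.mod i 4 == 0 then (10 : Int) else 5, 20]

-- loop invariant: from i = a ≥ 1 with j = (a-1) % 4, A's loop appends exactly the rest+focus pairs
lemma pom_loop (n : Nat) : ∀ (a : Int) (seq : List Int), 1 ≤ a →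
    (PySem.List.pyRange a (a + n) 1).foldl pomA_step (seq, PySem.Int.mod (a - 1) 4)
      = ((PySem.List.pyRange a (a + n) 1).foldl pomRest_step seq, PySem.Int.mod (a + n - 1) 4) := by
  induction n with
  | zero =>
    intro a seq _
    simp [PySem.List.pyRange_one_eq_nil (le_refl a)]
  | succ m ih =>
    intro a seq ha
    have hlt : a < a + (m + 1 : Nat) := by push_cast; omega
    rw [PySem.List.pyRange_one_cons hlt]
    have hstep : pomA_step (seq, PySem.Int.mod (a - 1) 4) a = (pomRest_step seq a, PySem.Int.mod a 4) := by
      have hb : (0 : Int) < 4 := by omega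
      have h0 : 0 ≤ PySem.Int.mod (a - 1) 4 := PySem.Int.mod_nonneg _ hb
      have h4 : PySem.Int.mod (a - 1) 4 < 4 := PySem.Int.mod_lt _ hb
      have hem : PySem.Int.mod (a - 1) 4 = (a - 1) % 4 := PySem.Int.mod_eq_emod_of_pos hb
      have hem' : PySem.Int.mod a 4 = a % 4 := PySem.Int.mod_eq_emod_of_pos hb
      rw [hem] at h0 h4 ⊢
      by_cases h3 : (a - 1) % 4 < 3
      · have hne : ¬ a % 4 = 0 := by omega
        have hsucc : (a - 1) % 4 + 1 = a % 4 := by omega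
        simp [pomA_step, pomRest_step, show (0:Int) < a by omega, h3, hsucc, hne]
      · have heq3 : (a - 1) % 4 = 3 := by omega
        have hz : a % 4 = 0 := by omega
        simp [pomA_step, pomRest_step, show (0:Int) < a by omega, heq3, hz]
    simp only [List.foldl_cons, hstep]
    have ha1 : 1 ≤ a + 1 := by omega
    have hr : a + (m + 1 : Nat) = (a + 1) + (m : Nat) := by push_cast; ring
    rw [hr]
    have := ih (a + 1) (pomRest_step seq a) ha1
    simp only [add_sub_cancel_right] at this ⊢
    rw [this]

-- the rest+focus fold from 1 to m+1 builds pomSpec (m+1)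
lemma pomRest_fold (m : Nat) :
    (PySem.List.pyRange 1 (1 + m) 1).foldl pomRest_step [20] = pomSpec (m + 1) := by
  induction m with
  | zero => simp [PySem.List.pyRange_one_eq_nil (le_refl (1:Int)), pomSpec]
  | succ k ih =>
    have h1 : (1 : Int) + (k + 1 : Nat) = 1 + (k : Nat) + 1 := by push_cast; ring
    rw [h1, PySem.List.pyRange_one_succ_right (by omega), List.foldl_append, ih]
    have hmod : PySem.Int.mod (1 + (k : Nat)) 4 = (((k + 1) % 4 : Nat) : Int) := by
      have hc : (1 : Int) + (k : Nat) = ((k + 1 : Nat) : Int) := by push_cast; ring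
      rw [hc]; exact_mod_cast PySem.Int.mod_natCast (k + 1) 4
    simp only [List.foldl_cons, List.foldl_nil, pomRest_step, hmod]
    show pomSpec (k + 1) ++ _ = pomSpec (k + 2)
    have hif : (if ((((k + 1) % 4 : Nat) : Int) == 0) = true then (10 : Int) else 5)
        = (if (k + 1) % 4 = 0 then (10 : Int) else 5) := by
      by_cases hz : (k + 1) % 4 = 0
      · simp [hz]
      · simp [hz]; omega
    rw [hif]
    by_cases hz : (k + 1) % 4 = 0 <;> simp [pomSpec, hz]

-- pomSpec is periodic: every 4 further focus periods prepend one full block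
lemma pomSpec_periodic (n : Nat) (hn : 1 ≤ n) : pomSpec (n + 4) = pomBlock ++ pomSpec n := by
  induction n with
  | zero => omega
  | succ k ih =>
    by_cases hk : k = 0
    · subst hk; decide
    · have h1 : 1 ≤ k := by omega
      have hmod : (k + 4) % 4 = k % 4 := by omega
      have : pomSpec (k + 5) = pomSpec (k + 4) ++ (if k + 4 = 0 then [20] else [if (k + 4) % 4 = 0 then 10 else 5, 20]) := rfl
      rw [show k + 1 + 4 = k + 5 from rfl, this, ih h1, hmod]
      simp [pomSpec, hk, List.append_assoc]

-- truncating a sufficiently long tiling of the block gives pomSpec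
lemma take_tile (n : Nat) : ∀ (k : Nat), 1 ≤ n → 2 * n - 1 ≤ 8 * k →
    (List.flatten (List.replicate k pomBlock)).take (2 * n - 1) = pomSpec n := by
  induction n using Nat.strong_induction_on with
  | _ n ih =>
    intro k hn hk
    by_cases hsmall : n ≤ 4
    · have hk1 : 1 ≤ k := by omega
      obtain ⟨k', rfl⟩ : ∃ k', k = k' + 1 := ⟨k - 1, by omega⟩
      rw [List.replicate_succ, List.flatten_cons]
      rw [List.take_append_of_le_length (by simp [pomBlock]; omega)]
      interval_cases n <;> decide
    · have hk2 : 2 ≤ k := by omega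
      obtain ⟨k', rfl⟩ : ∃ k', k = k' + 1 := ⟨k - 1, by omega⟩
      rw [List.replicate_succ, List.flatten_cons]
      have hlen : (pomBlock.length : Nat) = 8 := by decide
      have h2 : 2 * n - 1 = pomBlock.length + (2 * (n - 4) - 1) := by rw [hlen]; omega
      rw [h2, List.take_append, List.take_of_length_le (Nat.le_add_right _ _),
        Nat.add_sub_cancel_left, ih (n - 4) (by omega) k' (by omega) (by omega)]
      have := pomSpec_periodic (n - 4) (by omega)
      rw [show n - 4 + 4 = n by omega] at this
      rw [this]

-- ===== VERDICT (by name: the statement is the Claim_ definition above) =====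
theorem create_pomodoro_sequence_spec : Claim_equal_create_pomodoro_sequence := by
  intro duration short_rest long_rest _
  unfold Spec_create_pomodoro_sequence create_pomodoro_sequence create_pomodoro_sequence_alt
  set fp := PySem.Int.floordiv duration 20 with hfp
  by_cases h : fp ≤ 0
  · simp [h, PySem.List.pyRange_one_eq_nil h]
  · rw [not_le] at h
    simp only [if_neg (by omega : ¬ fp ≤ 0)]
    -- B side: the take of the tiling is pomSpec fp.toNat
    have hB : (List.flatten (List.replicate (PySem.Int.floordiv (2 * fp - 1 + 7) 8).toNat pomBlock)).take
        (2 * fp - 1).toNat = pomSpec fp.toNat := by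
      rw [PySem.Int.floordiv_eq_ediv_of_pos (by omega : (0:Int) < 8)]
      have h1 : (2 * fp - 1).toNat = 2 * fp.toNat - 1 := by omega
      rw [h1]
      exact take_tile fp.toNat _ (by omega) (by omega)
    -- A side: peel the first iteration, apply the loop invariant and the fold characterisation
    have hA : ((PySem.List.pyRange 0 fp 1).foldl pomA_step ([], 0)).1 = pomSpec fp.toNat := by
      rw [PySem.List.pyRange_one_cons (by omega : (0:Int) < fp)]
      have hfirst : pomA_step ([], 0) 0 = (([20] : List Int), (0 : Int)) := by decide
      simp only [List.foldl_cons, hfirst, zero_add]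
      have hn : fp = 1 + ((fp - 1).toNat : Int) := by omega
      have h0 : PySem.Int.mod ((1 : Int) - 1) 4 = 0 := by decide
      rw [hn]
      have hloop := pom_loop (fp - 1).toNat 1 [20] (le_refl 1)
      rw [h0] at hloop
      rw [hloop]
      show (PySem.List.pyRange 1 (1 + ((fp - 1).toNat : Int)) 1).foldl pomRest_step [20] = _
      rw [pomRest_fold]
      congr 1
      omega
    exact hA.trans hB.symm
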